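-- pv_equiv track=rewrite | github.com/PelicanQ/runpod-qubits | five/hamil.py | make_excitation_idx_map
-- ===== SOURCE A (Python) =====
-- import itertools
--
-- def make_excitation_idx_map(max_excitation: int):
--     even_map: dict[tuple, int] = {}
--     odd_map: dict[tuple, int] = {}
--     e = 0
--     o = 0
--     # the order we use is the one after filtering itertools.product output
--     for state in itertools.product(range(max_excitation + 1), repeat=5):
--         m = sum(state)
--         if m > max_excitation:
--             continue
--         if m % 2 == 0:
--             even_map[state] = e
--             e += 1
--         else:
--             odd_map[state] = o
--             o += 1
--     return even_map, odd_map
-- ===== SOURCE B (Python) =====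
-- def make_excitation_idx_map(max_excitation: int):
--     # Generate only the valid states directly, bounding each loop by the
--     # remaining excitation budget; same lex order as filtered product output.
--     even_map: dict[tuple, int] = {}
--     odd_map: dict[tuple, int] = {}
--     for a in range(max_excitation + 1):
--         for b in range(max_excitation - a + 1):
--             for c in range(max_excitation - a - b + 1):
--                 for d in range(max_excitation - a - b - c + 1):
--                     for e in range(max_excitation - a - b - c - d + 1):
--                         state = (a, b, c, d, e)
--                         if sum(state) % 2 == 0:
--                             even_map[state] = len(even_map)
--                         else:
--                             odd_map[state] = len(odd_map)
--     return even_map, odd_map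
-- ===== Notes on version B (the rewrite author's own statement) =====
-- stated objective: alternative
-- what changed: Instead of enumerating all (max+1)^5 tuples with itertools.product and filtering by sum, B uses nested loops bounded by the remaining excitation budget so only valid tuples are generated (in the same lex order), with dict lengths replacing the explicit counters.
import Mathlib
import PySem

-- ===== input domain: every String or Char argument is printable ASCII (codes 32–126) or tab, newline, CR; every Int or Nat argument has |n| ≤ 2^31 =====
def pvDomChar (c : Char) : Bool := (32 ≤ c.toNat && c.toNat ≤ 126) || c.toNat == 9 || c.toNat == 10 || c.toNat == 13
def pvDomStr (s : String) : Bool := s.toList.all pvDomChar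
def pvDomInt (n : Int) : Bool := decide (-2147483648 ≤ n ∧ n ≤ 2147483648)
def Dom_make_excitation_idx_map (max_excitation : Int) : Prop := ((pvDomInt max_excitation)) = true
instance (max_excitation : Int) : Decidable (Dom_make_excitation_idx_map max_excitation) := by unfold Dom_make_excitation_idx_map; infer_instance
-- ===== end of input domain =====

-- B replaces A's product-then-filter over all (max+1)^5 tuples by remaining-budget-bounded
-- nested loops that generate only the valid tuples, in the same lex order (objective: alternative).

-- ===== PORT A =====
-- itertools.product(range(max+1), repeat=5) in lex order; tuples ported as List Int
def make_excitation_idx_map (max_excitation : Int) : (List (List Int × Int)) × (List (List Int × Int)) :=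
  let r := PySem.List.pyRange 0 (max_excitation + 1) 1
  let states : List (List Int) :=
    r.flatMap fun a => r.flatMap fun b => r.flatMap fun c => r.flatMap fun d =>
      r.map fun e => [a, b, c, d, e]
  let res :=
    states.foldl
      (fun (st : PySem.Dict (List Int) Int × PySem.Dict (List Int) Int × Int × Int) state =>
        let m := state.sum
        if m > max_excitation then st
        else if PySem.Int.mod m 2 == 0 then
          (st.1.insert state st.2.2.1, st.2.1, st.2.2.1 + 1, st.2.2.2)
        else
          (st.1, st.2.1.insert state st.2.2.2, st.2.2.1, st.2.2.2 + 1))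
      (PySem.Dict.empty, PySem.Dict.empty, 0, 0)
  (res.1.items, res.2.1.items)

-- ===== PORT B =====
def make_excitation_idx_map_alt (max_excitation : Int) : (List (List Int × Int)) × (List (List Int × Int)) :=
  let res :=
    (PySem.List.pyRange 0 (max_excitation + 1) 1).foldl (fun st a =>
      (PySem.List.pyRange 0 (max_excitation - a + 1) 1).foldl (fun st b =>
        (PySem.List.pyRange 0 (max_excitation - a - b + 1) 1).foldl (fun st c =>
          (PySem.List.pyRange 0 (max_excitation - a - b - c + 1) 1).foldl (fun st d =>
            (PySem.List.pyRange 0 (max_excitation - a - b - c - d + 1) 1).foldl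
              (fun (st : PySem.Dict (List Int) Int × PySem.Dict (List Int) Int) e =>
                let state : List Int := [a, b, c, d, e]
                if PySem.Int.mod state.sum 2 == 0 then
                  (st.1.insert state (st.1.size : Int), st.2)
                else
                  (st.1, st.2.insert state (st.2.size : Int)))
              st) st) st) st)
      (PySem.Dict.empty, PySem.Dict.empty)
  (res.1.items, res.2.items)

-- ===== PRECONDITION & SPEC =====
def Spec_make_excitation_idx_map (max_excitation : Int) (out : (List (List Int × Int)) × (List (List Int × Int))) : Prop := out = make_excitation_idx_map_alt max_excitation
instance (max_excitation : Int) (out : (List (List Int × Int)) × (List (List Int × Int))) : Decidable (Spec_make_excitation_idx_map max_excitation out) := by unfold Spec_make_excitation_idx_map; infer_instance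

-- ===== CLAIM (what is proved, stated in full; the proofs are below) =====
def Claim_equal_make_excitation_idx_map : Prop := ∀ (max_excitation : Int), Dom_make_excitation_idx_map max_excitation → Spec_make_excitation_idx_map max_excitation (make_excitation_idx_map max_excitation)

-- ===== LEMMAS AND PROOFS =====

-- A's loop body without the filter branch (counters e, o carried explicitly)
def pvStepF (st : PySem.Dict (List Int) Int × PySem.Dict (List Int) Int × Int × Int)
    (state : List Int) : PySem.Dict (List Int) Int × PySem.Dict (List Int) Int × Int × Int :=
  if PySem.Int.mod state.sum 2 == 0 then
    (st.1.insert state st.2.2.1, st.2.1, st.2.2.1 + 1, st.2.2.2)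
  else
    (st.1, st.2.1.insert state st.2.2.2, st.2.2.1, st.2.2.2 + 1)

-- B's loop body (indices are the current dict sizes)
def pvStepB (st : PySem.Dict (List Int) Int × PySem.Dict (List Int) Int)
    (state : List Int) : PySem.Dict (List Int) Int × PySem.Dict (List Int) Int :=
  if PySem.Int.mod state.sum 2 == 0 then
    (st.1.insert state (st.1.size : Int), st.2)
  else
    (st.1, st.2.insert state (st.2.size : Int))

-- k-fold cartesian product of range(mx+1), lex order (A's state stream)
def pvProdK : Nat → Int → List (List Int)
  | 0, _ => [[]]
  | k + 1, mx => (PySem.List.pyRange 0 (mx + 1) 1).flatMap fun a => (pvProdK k mx).map (a :: ·)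

-- budget-bounded tuples, lex order (B's state stream)
def pvGenK : Nat → Int → List (List Int)
  | 0, _ => [[]]
  | k + 1, b => (PySem.List.pyRange 0 (b + 1) 1).flatMap fun a => (pvGenK k (b - a)).map (a :: ·)

lemma pv_flatMap_singleton_map {α β : Type} (l : List α) (f : α → β) :
    (l.flatMap fun x => [f x]) = l.map f := by
  induction l with
  | nil => rfl
  | cons x t ih => simp [List.flatMap_cons, ih]

lemma pv_sum_nonneg_prodK : ∀ (k : Nat) (mx : Int) (s : List Int), s ∈ pvProdK k mx → 0 ≤ s.sum := by
  intro k
  induction k with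
  | zero => intro mx s hs; simp [pvProdK] at hs; simp [hs]
  | succ k ih =>
    intro mx s hs
    simp only [pvProdK, List.mem_flatMap, List.mem_map] at hs
    obtain ⟨a, ha, t, ht, rfl⟩ := hs
    have h0 : (0 : Int) ≤ a := (PySem.List.mem_pyRange_one.1 ha).1
    have := ih mx t ht
    simp only [List.sum_cons]; omega

lemma pv_filter_prodK_eq_genK : ∀ (k : Nat) (b mx : Int), 0 ≤ b → b ≤ mx →
    (pvProdK k mx).filter (fun s => decide (s.sum ≤ b)) = pvGenK k b := by
  intro k
  induction k with
  | zero =>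
    intro b mx hb _
    simp only [pvProdK, pvGenK, List.filter_cons, List.filter_nil, List.sum_nil,
      decide_eq_true_eq]
    simp [hb]
  | succ k ih =>
    intro b mx hb hbm
    simp only [pvProdK, pvGenK, List.filter_flatMap]
    rw [PySem.List.pyRange_one_append 0 (b + 1) (mx + 1) (by omega) (by omega),
      List.flatMap_append]
    have h2 : ((PySem.List.pyRange (b + 1) (mx + 1) 1).flatMap fun a =>
        ((pvProdK k mx).map (a :: ·)).filter (fun s => decide (s.sum ≤ b))) = [] := by
      apply List.flatMap_eq_nil_iff.2
      intro a ha
      have hab : b + 1 ≤ a := (PySem.List.mem_pyRange_one.1 ha).1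
      apply List.filter_eq_nil_iff.2
      intro s hs
      simp only [List.mem_map] at hs
      obtain ⟨t, ht, rfl⟩ := hs
      have := pv_sum_nonneg_prodK k mx t ht
      simp only [List.sum_cons, decide_eq_true_eq]
      omega
    rw [h2, List.append_nil]
    apply List.flatMap_congr
    intro a ha
    have ha' := PySem.List.mem_pyRange_one.1 ha
    rw [List.filter_map]
    have hcond : ((fun s => decide (s.sum ≤ b)) ∘ (a :: ·)) = (fun s : List Int => decide (s.sum ≤ b - a)) := by
      funext s; simp only [Function.comp, List.sum_cons, decide_eq_decide]; omega
    rw [hcond, ih (b - a) mx (by omega) (by omega)]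

lemma pv_nodup_genK : ∀ (k : Nat) (b : Int), (pvGenK k b).Nodup := by
  intro k
  induction k with
  | zero => intro b; simp [pvGenK]
  | succ k ih =>
    intro b
    simp only [pvGenK]
    rw [List.nodup_flatMap]
    constructor
    · intro a _; exact (ih (b - a)).map (fun x y h => by injection h)
    · apply List.Pairwise.imp ?_ (PySem.List.pairwise_lt_pyRange_one 0 (b + 1))
      intro a a' hlt s hs hs'
      simp only [List.mem_map] at hs hs'
      obtain ⟨t, _, rfl⟩ := hs
      obtain ⟨t', _, h⟩ := hs'
      injection h with h1 _
      omega

-- folding A's (unfiltered) body over a duplicate-free, fresh list of states equals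
-- folding B's body, with the counters tracking the dict sizes
lemma pv_fold_inv : ∀ (l : List (List Int)) (ev od : PySem.Dict (List Int) Int),
    l.Nodup → (∀ s ∈ l, ev.contains s = false) → (∀ s ∈ l, od.contains s = false) →
    l.foldl pvStepF (ev, od, (ev.size : Int), (od.size : Int)) =
      ((l.foldl pvStepB (ev, od)).1, (l.foldl pvStepB (ev, od)).2,
       ((l.foldl pvStepB (ev, od)).1.size : Int), ((l.foldl pvStepB (ev, od)).2.size : Int)) := by
  intro l
  induction l with
  | nil => intro ev od _ _ _; simp
  | cons s t ih =>
    intro ev od hnd hev hod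
    have hevs : ev.contains s = false := hev s (by simp)
    have hods : od.contains s = false := hod s (by simp)
    have hst : s ∉ t := (List.nodup_cons.1 hnd).1
    have hndt : t.Nodup := (List.nodup_cons.1 hnd).2
    simp only [List.foldl_cons]
    by_cases hc : PySem.Int.mod s.sum 2 == 0
    · have hstep : pvStepF (ev, od, (ev.size : Int), (od.size : Int)) s =
          (ev.insert s (ev.size : Int), od, ((ev.insert s (ev.size : Int)).size : Int), (od.size : Int)) := by
        simp only [pvStepF, hc, if_true, PySem.Dict.size_insert, hevs]
        push_cast; ring_nf
      have hstepB : pvStepB (ev, od) s = (ev.insert s (ev.size : Int), od) := by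
        simp only [pvStepB, hc, if_true]
      rw [hstep, hstepB]
      apply ih
      · exact hndt
      · intro u hu
        rw [PySem.Dict.contains_insert]
        have : u ≠ s := fun h => hst (h ▸ hu)
        simp [this, hev u (by simp [hu])]
      · intro u hu; exact hod u (by simp [hu])
    · have hstep : pvStepF (ev, od, (ev.size : Int), (od.size : Int)) s =
          (ev, od.insert s (od.size : Int), (ev.size : Int), ((od.insert s (od.size : Int)).size : Int)) := by
        simp only [pvStepF, hc, if_false, Bool.false_eq_true, PySem.Dict.size_insert, hods]
        push_cast; ring_nf
      have hstepB : pvStepB (ev, od) s = (ev, od.insert s (od.size : Int)) := by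
        simp only [pvStepB, hc, if_false, Bool.false_eq_true]
      rw [hstep, hstepB]
      apply ih
      · exact hndt
      · intro u hu; exact hev u (by simp [hu])
      · intro u hu
        rw [PySem.Dict.contains_insert]
        have : u ≠ s := fun h => hst (h ▸ hu)
        simp [this, hod u (by simp [hu])]

-- A's loop (with its `continue` filter) is pvStepF over the filtered list
lemma pv_foldl_skip (mx : Int) : ∀ (l : List (List Int)) (init : PySem.Dict (List Int) Int × PySem.Dict (List Int) Int × Int × Int),
    l.foldl (fun st s => if s.sum > mx then st else pvStepF st s) init =
      (l.filter fun s => decide (s.sum ≤ mx)).foldl pvStepF init := by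
  intro l
  induction l with
  | nil => intro init; rfl
  | cons s t ih =>
    intro init
    simp only [List.foldl_cons, List.filter_cons]
    by_cases h : s.sum ≤ mx
    · rw [if_neg (by omega), if_pos (by simpa using h)]
      simp only [List.foldl_cons]
      exact ih _
    · rw [if_pos (by omega), if_neg (by simpa using h)]
      exact ih init

-- A's state stream is pvProdK 5
lemma pv_states_eq (mx : Int) :
    ((PySem.List.pyRange 0 (mx + 1) 1).flatMap fun a =>
      (PySem.List.pyRange 0 (mx + 1) 1).flatMap fun b =>
        (PySem.List.pyRange 0 (mx + 1) 1).flatMap fun c =>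
          (PySem.List.pyRange 0 (mx + 1) 1).flatMap fun d =>
            (PySem.List.pyRange 0 (mx + 1) 1).map fun e => [a, b, c, d, e]) = pvProdK 5 mx := by
  simp only [pvProdK, List.map_flatMap, List.map_map]
  apply List.flatMap_congr; intro a _
  apply List.flatMap_congr; intro b _
  apply List.flatMap_congr; intro c _
  apply List.flatMap_congr; intro d _
  rw [← pv_flatMap_singleton_map (PySem.List.pyRange 0 (mx + 1) 1) (fun e => [a, b, c, d, e])]
  apply List.flatMap_congr; intro e _
  simp [Function.comp]

-- B's nested loops are a single fold of pvStepB over pvGenK 5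
lemma pv_alt_eq_genK_fold (mx : Int) :
    make_excitation_idx_map_alt mx =
      (((pvGenK 5 mx).foldl pvStepB (PySem.Dict.empty, PySem.Dict.empty)).1.items,
       ((pvGenK 5 mx).foldl pvStepB (PySem.Dict.empty, PySem.Dict.empty)).2.items) := by
  simp only [make_excitation_idx_map_alt, pvGenK, pvStepB, List.foldl_flatMap, List.foldl_map,
    List.foldl_cons, List.foldl_nil]

theorem pv_main (mx : Int) : make_excitation_idx_map mx = make_excitation_idx_map_alt mx := by
  by_cases hmx : 0 ≤ mx
  · have hbody : (fun (st : PySem.Dict (List Int) Int × PySem.Dict (List Int) Int × Int × Int)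
        (state : List Int) =>
        let m := state.sum
        if m > mx then st
        else if PySem.Int.mod m 2 == 0 then
          (st.1.insert state st.2.2.1, st.2.1, st.2.2.1 + 1, st.2.2.2)
        else
          (st.1, st.2.1.insert state st.2.2.2, st.2.2.1, st.2.2.2 + 1)) =
        (fun st s => if s.sum > mx then st else pvStepF st s) := by
      funext st s; rfl
    rw [make_excitation_idx_map, pv_alt_eq_genK_fold]
    simp only [hbody, pv_states_eq, pv_foldl_skip,
      pv_filter_prodK_eq_genK 5 mx mx hmx le_rfl]
    rw [show ((0 : Int), (0 : Int)) = (((PySem.Dict.empty : PySem.Dict (List Int) Int).size : Int),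
      ((PySem.Dict.empty : PySem.Dict (List Int) Int).size : Int)) by simp]
    rw [pv_fold_inv (pvGenK 5 mx) PySem.Dict.empty PySem.Dict.empty (pv_nodup_genK 5 mx)
      (fun s _ => PySem.Dict.contains_empty s) (fun s _ => PySem.Dict.contains_empty s)]
  · have h0 : PySem.List.pyRange 0 (mx + 1) 1 = [] := PySem.List.pyRange_one_eq_nil (by omega)
    rw [make_excitation_idx_map, make_excitation_idx_map_alt]
    simp [h0]

-- ===== VERDICT (by name: the statement is the Claim_ definition above) =====
theorem make_excitation_idx_map_spec : Claim_equal_make_excitation_idx_map := by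
  intro mx _
  unfold Spec_make_excitation_idx_map
  exact pv_main mx
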